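-- pv_equiv track=rewrite | github.com/MrBrantCode/unitest_baseline | mut_generate/mist_train_cf/cf_19713/solution.py | count_a
-- ===== SOURCE A (Python) =====
-- def count_a(string):
--     count = 0
--     i = 0
--     while i < len(string):
--         if string[i] == 'a':
--             if i + 1 < len(string) and string[i + 1] == 'b':
--                 i += 2
--                 continue
--             count += 1
--         i += 1
--     return count
-- ===== SOURCE B (Python) =====
-- def count_a(string):
--     return string.count('a') - string.count('ab')
-- ===== Notes on version B (the rewrite author's own statement) =====
-- stated objective: simpler
-- what changed: Replaces the stateful index-skipping while loop with two built-in substring counting passes and a subtraction: total count of the letter a minus the number of ab occurrences.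
import Mathlib
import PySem

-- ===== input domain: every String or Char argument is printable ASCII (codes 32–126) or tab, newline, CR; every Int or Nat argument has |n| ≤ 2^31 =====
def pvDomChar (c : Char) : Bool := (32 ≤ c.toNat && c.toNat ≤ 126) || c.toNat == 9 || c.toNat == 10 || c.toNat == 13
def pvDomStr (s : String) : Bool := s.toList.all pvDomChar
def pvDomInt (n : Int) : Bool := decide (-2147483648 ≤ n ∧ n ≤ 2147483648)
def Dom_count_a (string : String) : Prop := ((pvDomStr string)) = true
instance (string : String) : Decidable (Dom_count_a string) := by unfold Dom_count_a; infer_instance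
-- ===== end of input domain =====

-- B replaces A's stateful index-skipping scan by two built-in substring counts and a
-- subtraction (count('a') - count('ab')); objective: simpler.

-- ===== PORT A =====
-- the while loop: at each position, 'a' followed by 'b' skips two chars, a lone 'a'
-- bumps the counter, anything else just advances
def count_a_loop : List Char → Int → Int
  | [], count => count
  | 'a' :: 'b' :: rest, count => count_a_loop rest count
  | 'a' :: rest, count => count_a_loop rest (count + 1)
  | _ :: rest, count => count_a_loop rest count

def count_a (string : String) : Int := count_a_loop string.toList 0

-- ===== PORT B =====
def count_a_alt (string : String) : Int :=
  (PySem.Str.count string "a" : Int) - (PySem.Str.count string "ab" : Int)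

-- ===== PRECONDITION & SPEC =====
def Spec_count_a (string : String) (out : Int) : Prop := out = count_a_alt string
instance (string : String) (out : Int) : Decidable (Spec_count_a string out) := by unfold Spec_count_a; infer_instance

-- ===== CLAIM (what is proved, stated in full; the proofs are below) =====
def Claim_equal_count_a : Prop := ∀ (string : String), Dom_count_a string → Spec_count_a string (count_a string)

-- ===== LEMMAS AND PROOFS =====

-- accumulator of count.go shifts out
theorem pv_go_acc (sub : List Char) : ∀ (fuel : Nat) (l : List Char) (acc : Nat),
    PySem.Chars.count.go sub fuel l acc = acc + PySem.Chars.count.go sub fuel l 0 := by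
  intro fuel
  induction fuel with
  | zero => intro l acc; simp [PySem.Chars.count.go]
  | succ f ih =>
    intro l acc
    cases l with
    | nil => simp [PySem.Chars.count.go]
    | cons h t =>
      rw [PySem.Chars.count.go, PySem.Chars.count.go]
      split_ifs with hp
      · rw [ih _ 1, ih _ (acc + 1)]; omega
      · exact ih t acc

-- fuel irrelevance of count.go (above the list length), for nonempty sub
theorem pv_go_fuel (sub : List Char) (hsub : sub ≠ []) :
    ∀ (fuel fuel' : Nat) (l : List Char), l.length ≤ fuel → l.length ≤ fuel' →
    PySem.Chars.count.go sub fuel l 0 = PySem.Chars.count.go sub fuel' l 0 := by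
  intro fuel
  induction fuel with
  | zero =>
    intro fuel' l hl hl'
    cases l with
    | nil => cases fuel' <;> simp [PySem.Chars.count.go]
    | cons h t => simp at hl
  | succ f ih =>
    intro fuel' l hl hl'
    cases l with
    | nil => cases fuel' <;> simp [PySem.Chars.count.go]
    | cons h t =>
      simp only [List.length_cons] at hl hl'
      obtain ⟨f', rfl⟩ : ∃ f', fuel' = f' + 1 := ⟨fuel' - 1, by omega⟩
      rw [PySem.Chars.count.go, PySem.Chars.count.go]
      split_ifs with hp
      · have hlen : (List.drop sub.length (h :: t)).length ≤ t.length := by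
          simp only [List.length_drop, List.length_cons]
          cases sub with
          | nil => exact absurd rfl hsub
          | cons a s => simp
        rw [pv_go_acc sub f, pv_go_acc sub f', ih f' _ (by omega) (by omega)]
      · exact ih f' t (by omega) (by omega)

theorem pv_isEmpty_false (sub : List Char) (hsub : sub ≠ []) : sub.isEmpty = false := by
  cases sub with
  | nil => exact absurd rfl hsub
  | cons a s => rfl

-- one-step recurrence of Chars.count for a nonempty pattern
theorem pv_count_cons (sub : List Char) (hsub : sub ≠ []) (x : Char) (t : List Char) :
    PySem.Chars.count (x :: t) sub =
      if sub.isPrefixOf (x :: t) then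
        PySem.Chars.count ((x :: t).drop sub.length) sub + 1
      else PySem.Chars.count t sub := by
  simp only [PySem.Chars.count, pv_isEmpty_false sub hsub, Bool.false_eq_true, if_false,
    List.length_cons]
  rw [PySem.Chars.count.go]
  split_ifs with hp
  · have hlen : (List.drop sub.length (x :: t)).length ≤ t.length := by
      simp only [List.length_drop, List.length_cons]
      cases sub with
      | nil => exact absurd rfl hsub
      | cons a s => simp
    rw [pv_go_acc, pv_go_fuel sub hsub t.length _ _ hlen (le_refl _)]
    omega
  · rfl

theorem pv_count_nil (sub : List Char) (hsub : sub ≠ []) :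
    PySem.Chars.count [] sub = 0 := by
  simp [PySem.Chars.count, pv_isEmpty_false sub hsub, PySem.Chars.count.go]

-- counting the single-char pattern ['a'] is counting the char 'a'
theorem pv_count_single (l : List Char) :
    PySem.Chars.count l ['a'] = l.count 'a' := by
  induction l with
  | nil => rw [pv_count_nil _ (by simp)]; rfl
  | cons x t ih =>
    rw [pv_count_cons _ (by simp)]
    by_cases hx : x = 'a'
    · subst hx; simp [List.isPrefixOf, ih]
    · simp [List.isPrefixOf, Ne.symm hx, hx, ih]

-- the invariant of A's scan: count = acc + #'a' − #"ab"
theorem pv_loop_eq (l : List Char) (acc : Int) :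
    count_a_loop l acc =
      acc + (l.count 'a' : Int) - (PySem.Chars.count l ['a','b'] : Int) := by
  fun_induction count_a_loop l acc with
  | case1 c =>
    rw [pv_count_nil _ (by simp)]; simp
  | case2 rest c ih =>
    have h2 : PySem.Chars.count ('a' :: 'b' :: rest) ['a','b']
        = PySem.Chars.count rest ['a','b'] + 1 := by
      rw [pv_count_cons _ (by simp)]; simp [List.isPrefixOf]
    rw [ih, h2]
    simp only [List.count_cons]
    norm_num
    omega
  | case3 rest c h ih =>
    have hnp : (['a','b'] : List Char).isPrefixOf ('a' :: rest) = false := by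
      cases rest with
      | nil => rfl
      | cons y t =>
        have hy : y ≠ 'b' := fun hy => h t (by rw [hy])
        simp [List.isPrefixOf, Ne.symm hy]
    have h2 : PySem.Chars.count ('a' :: rest) ['a','b']
        = PySem.Chars.count rest ['a','b'] := by
      rw [pv_count_cons _ (by simp), hnp]; simp
    rw [ih, h2]
    simp only [List.count_cons]
    norm_num
    omega
  | case4 x rest c h1 h2 ih =>
    have hx : x ≠ 'a' := h2
    have hc2 : PySem.Chars.count (x :: rest) ['a','b'] = PySem.Chars.count rest ['a','b'] := by
      rw [pv_count_cons _ (by simp)]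
      simp [List.isPrefixOf, Ne.symm hx]
    rw [ih, hc2]
    simp [hx]

-- ===== VERDICT (by name: the statement is the Claim_ definition above) =====
theorem count_a_spec : Claim_equal_count_a := by
  intro s _
  show count_a s = count_a_alt s
  simp only [count_a, count_a_alt, PySem.Str.count_eq, pv_loop_eq,
    (by decide : "a".toList = ['a']), (by decide : "ab".toList = ['a','b']),
    pv_count_single]
  omega
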